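-- pv_equiv track=rewrite | github.com/JashanGrewal/BJS_Assignment | task2(1).py | character_occurance
-- ===== SOURCE A (Python) =====
-- def character_occurance(input_str):
--     """
--     :param input_str: string characters
--     :return: True or False based on certain conditions
--     """
--     a_occurred = False
--     b_occurred = False
--     for element in input_str:
--         if element == 'a':
--             if b_occurred:
--                 return False
--             else:
--                 a_occurred = True
--         elif element == 'b':
--             b_occurred = True
--
--     result = a_occurred or b_occurred
--     return result
-- ===== SOURCE B (Python) =====
-- def character_occurance(input_str):
--     has_a = 'a' in input_str
--     has_b = 'b' in input_str
--     if not (has_a or has_b):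
--         return False
--     if has_b:
--         first_b = input_str.index('b')
--         return 'a' not in input_str[first_b + 1:]
--     return True
-- ===== Notes on version B (the rewrite author's own statement) =====
-- stated objective: alternative
-- what changed: Replaces A's single-pass two-flag state machine with early return by membership tests, the index of the first letter b, and a scan of the tail after it.
import Mathlib
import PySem

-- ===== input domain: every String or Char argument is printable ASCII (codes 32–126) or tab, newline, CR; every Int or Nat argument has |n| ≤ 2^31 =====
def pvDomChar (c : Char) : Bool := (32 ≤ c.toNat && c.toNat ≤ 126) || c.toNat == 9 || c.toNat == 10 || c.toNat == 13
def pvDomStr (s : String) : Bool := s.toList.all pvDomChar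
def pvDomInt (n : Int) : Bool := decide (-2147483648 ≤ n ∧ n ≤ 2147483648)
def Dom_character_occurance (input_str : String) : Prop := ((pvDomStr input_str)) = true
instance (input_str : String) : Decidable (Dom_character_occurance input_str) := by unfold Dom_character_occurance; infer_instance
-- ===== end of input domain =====

-- B replaces A's two-flag state machine by membership tests, the index of the first letter b and a tail scan; alternative, same cost.

-- ===== PORT A =====
-- A's for-loop with early return, over the two flags a_occurred / b_occurred
def pvLoopA : List Char → Bool → Bool → Bool
  | [], a_occurred, b_occurred => a_occurred || b_occurred
  | c :: rest, a_occurred, b_occurred =>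
    if c = 'a' then
      if b_occurred then false else pvLoopA rest true b_occurred
    else if c = 'b' then pvLoopA rest a_occurred true
    else pvLoopA rest a_occurred b_occurred

def character_occurance (input_str : String) : Bool :=
  pvLoopA input_str.toList false false

-- ===== PORT B =====
def character_occurance_alt (input_str : String) : Bool :=
  let l := input_str.toList
  let has_a := l.contains 'a'
  let has_b := l.contains 'b'
  if !(has_a || has_b) then false
  else if has_b then
    match PySem.List.index? l 'b' with
    | some first_b => !(l.drop (first_b + 1)).contains 'a'  -- input_str[first_b+1:] with first_b+1 ≥ 0 is exactly drop
    | none => true  -- unreachable: has_b guards the .index call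
  else true

-- ===== PRECONDITION & SPEC =====
def Spec_character_occurance (input_str : String) (out : Bool) : Prop := out = character_occurance_alt input_str
instance (input_str : String) (out : Bool) : Decidable (Spec_character_occurance input_str out) := by unfold Spec_character_occurance; infer_instance

-- ===== CLAIM (what is proved, stated in full; the proofs are below) =====
def Claim_equal_character_occurance : Prop := ∀ (input_str : String), Dom_character_occurance input_str → Spec_character_occurance input_str (character_occurance input_str)

-- ===== LEMMAS AND PROOFS =====

-- once b_occurred is set, A returns true iff no 'a' remains
theorem pvLoopA_true (l : List Char) (a : Bool) :
    pvLoopA l a true = !l.contains 'a' := by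
  induction l generalizing a with
  | nil => simp [pvLoopA]
  | cons c rest ih =>
    by_cases hca : c = 'a'
    · simp [pvLoopA, hca]
    · by_cases hcb : c = 'b' <;> simp [pvLoopA, hca, hcb, ih, Ne.symm hca]

-- characterisation of A's loop from the initial state, via the index of the first letter b
theorem pvLoopA_false (l : List Char) (a : Bool) :
    pvLoopA l a false =
      match PySem.List.index? l 'b' with
      | none => a || l.contains 'a'
      | some i => !(l.drop (i + 1)).contains 'a' := by
  induction l generalizing a with
  | nil => simp [pvLoopA, PySem.List.index?]
  | cons c rest ih =>
    by_cases hcb : c = 'b'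
    · subst hcb
      rw [show pvLoopA ('b' :: rest) a false = pvLoopA rest a true by simp [pvLoopA]]
      rw [pvLoopA_true, PySem.List.index?_cons_self]
      simp
    · have hidx : PySem.List.index? (c :: rest) 'b'
          = (PySem.List.index? rest 'b').map (· + 1) :=
        PySem.List.index?_cons_of_ne rest hcb
      by_cases hca : c = 'a'
      · subst hca
        rw [show pvLoopA ('a' :: rest) a false = pvLoopA rest true false by simp [pvLoopA]]
        rw [ih, hidx]
        cases h : PySem.List.index? rest 'b' with
        | none => simp
        | some i => simp
      · rw [show pvLoopA (c :: rest) a false = pvLoopA rest a false by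
            simp [pvLoopA, hca, hcb]]
        rw [ih, hidx]
        cases h : PySem.List.index? rest 'b' with
        | none => simp [Ne.symm hca]
        | some i => simp

-- B unfolded into the same match on that index
theorem pvAlt_char (s : String) :
    character_occurance_alt s =
      match PySem.List.index? s.toList 'b' with
      | none => s.toList.contains 'a'
      | some i => !(s.toList.drop (i + 1)).contains 'a' := by
  unfold character_occurance_alt
  cases h : PySem.List.index? s.toList 'b' with
  | none =>
    have hb : 'b' ∉ s.toList := (PySem.List.index?_eq_none_iff _ _).mp h
    by_cases ha : 'a' ∈ s.toList <;> simp [hb, ha]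
  | some i =>
    have hb : 'b' ∈ s.toList := by
      have := PySem.List.index?_isSome_iff s.toList 'b'
      rw [h] at this
      exact this.mp rfl
    rw [PySem.List.index?_eq_idxOf?] at h
    simp [hb, h]

-- ===== VERDICT (by name: the statement is the Claim_ definition above) =====
theorem character_occurance_spec : Claim_equal_character_occurance := by
  intro s _
  unfold Spec_character_occurance character_occurance
  rw [pvLoopA_false, pvAlt_char]
  cases h : PySem.List.index? s.toList 'b' <;> simp
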